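-- pv_equiv track=rewrite | github.com/sion9262/TIL | algorithm/완전탐색DFS기초/재귀함수를이용한이진수출력.py | solve
-- ===== SOURCE A (Python) =====
-- def solve(n):
-- 	answer = ""
-- 	if n == 0:
-- 		return "0"
--
-- 	if n == 1:
-- 		return "1"
-- 	if n % 2 == 0:
-- 		answer += "0"
-- 		n = n // 2
-- 		answer += solve(n)
-- 	else:
-- 		answer += "1"
-- 		n = n // 2
-- 		answer += solve(n)
-- 	return answer
-- ===== SOURCE B (Python) =====
-- def solve(n):
--     if n == 0:
--         return "0"
--     if n == 1:
--         return "1"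
--     answer = ""
--     while n > 1:
--         answer += str(n % 2)
--         n //= 2
--     return answer + "1"
-- ===== Notes on version B (the rewrite author's own statement) =====
-- stated objective: simpler
-- what changed: Replaces the recursion with a plain iterative while-loop that appends bits LSB-first while halving n, then appends the final top bit.
import Mathlib
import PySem

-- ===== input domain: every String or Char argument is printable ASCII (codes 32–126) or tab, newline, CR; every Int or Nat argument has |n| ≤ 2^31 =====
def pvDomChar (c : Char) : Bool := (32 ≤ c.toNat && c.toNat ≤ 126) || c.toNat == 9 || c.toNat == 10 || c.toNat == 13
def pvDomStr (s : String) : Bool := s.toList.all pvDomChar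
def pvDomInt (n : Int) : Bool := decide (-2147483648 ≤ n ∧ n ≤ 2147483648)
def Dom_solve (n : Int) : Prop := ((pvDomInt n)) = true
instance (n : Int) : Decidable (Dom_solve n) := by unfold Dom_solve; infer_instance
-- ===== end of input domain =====

-- B replaces A's recursion by an iterative halving loop (objective: simpler decomposition);
-- equal on every non-negative input (negative inputs, where the Python A raises RecursionError, are excluded by Pre_).

-- ===== PORT A =====
-- A's recursion, on the Nat core (for n ≥ 0 Python's n // 2 is Nat division; exact there).
def solveNat : Nat → String
  | 0 => "0"
  | 1 => "1"
  | (m+2) =>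
      if (m+2) % 2 == 0 then "0" ++ solveNat ((m+2) / 2)
      else "1" ++ solveNat ((m+2) / 2)
  decreasing_by all_goals exact Nat.div_lt_self (by omega) (by omega)

-- On n < 0 Python A never terminates (RecursionError); those inputs are outside Pre_solve,
-- the port returns "" there.
def solve (n : Int) : String := if n < 0 then "" else solveNat n.toNat

-- ===== PORT B =====
-- the while-loop of Source B: answer += str(n % 2); n //= 2
def solveLoop (n : Int) (answer : String) : String :=
  if _h : n > 1 then
    solveLoop (PySem.Int.floordiv n 2) (answer ++ PySem.Int.toStr (PySem.Int.mod n 2))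
  else answer
  termination_by n.toNat
  decreasing_by
    have h2 : PySem.Int.floordiv n 2 = n / 2 := PySem.Int.floordiv_eq_ediv_of_pos (by omega)
    rw [h2]; omega

def solve_alt (n : Int) : String :=
  if n == 0 then "0"
  else if n == 1 then "1"
  else solveLoop n "" ++ "1"

-- ===== PRECONDITION & SPEC =====
-- Pre_ excludes exactly the negative inputs, where Python A raises RecursionError.
def Pre_solve (n : Int) : Prop := 0 ≤ n
instance (n : Int) : Decidable (Pre_solve n) := by unfold Pre_solve; infer_instance
def pvWitness_solve : Int := (6)
def Spec_solve (n : Int) (out : String) : Prop := out = solve_alt n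
instance (n : Int) (out : String) : Decidable (Spec_solve n out) := by unfold Spec_solve; infer_instance

-- ===== CLAIM (what is proved, stated in full; the proofs are below) =====
def Claim_equal_solve : Prop := ∀ (n : Int), Dom_solve n → Pre_solve n → Spec_solve n (solve n)

-- ===== LEMMAS AND PROOFS =====

-- loop invariant: for m ≥ 1, running the loop from (m, acc) and appending "1" yields acc ++ solveNat m
lemma solveLoop_eq (m : Nat) (hm : 1 ≤ m) : ∀ acc : String,
    solveLoop (m : Int) acc ++ "1" = acc ++ solveNat m := by
  induction m using Nat.strong_induction_on with
  | _ m ih =>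
    intro acc
    match m, hm with
    | 1, _ =>
        rw [solveLoop]; simp [solveNat]
    | (k+2), _ =>
        rw [solveLoop]
        have hgt : ((k+2 : Nat) : Int) > 1 := by push_cast; omega
        rw [dif_pos hgt]
        have hfd : PySem.Int.floordiv ((k+2 : Nat) : Int) 2 = (((k+2) / 2 : Nat) : Int) := by
          exact_mod_cast PySem.Int.floordiv_natCast (k+2) 2
        have hmd : PySem.Int.mod ((k+2 : Nat) : Int) 2 = (((k+2) % 2 : Nat) : Int) := by
          exact_mod_cast PySem.Int.mod_natCast (k+2) 2
        rw [hfd, hmd]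
        have hlt : (k+2) / 2 < k + 2 := Nat.div_lt_self (by omega) (by omega)
        have hge : 1 ≤ (k+2) / 2 := Nat.one_le_div_iff (by omega) |>.mpr (by omega)
        rw [ih _ hlt hge]
        rcases Nat.mod_two_eq_zero_or_one (k+2) with h | h <;>
          simp [solveNat, h, PySem.Int.toStr, String.append_assoc] <;> decide

theorem solve_alt_eq (m : Nat) : solve_alt (m : Int) = solveNat m := by
  match m with
  | 0 => simp [solve_alt, solveNat]
  | 1 => simp [solve_alt, solveNat]
  | (k+2) =>
      have h0 : ((k+2 : Nat) : Int) ≠ 0 := by push_cast; omega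
      have h1 : ((k+2 : Nat) : Int) ≠ 1 := by push_cast; omega
      simp only [solve_alt, beq_iff_eq, h0, h1, if_false]
      have := solveLoop_eq (k+2) (by omega) ""
      simpa using this

-- ===== VERDICT (by name: the statement is the Claim_ definition above) =====
theorem solve_spec : Claim_equal_solve := by
  intro n _ hpre
  unfold Spec_solve
  obtain ⟨m, rfl⟩ : ∃ m : Nat, n = (m : Int) := ⟨n.toNat, (Int.toNat_of_nonneg hpre).symm⟩
  rw [solve_alt_eq]
  simp [solve, Int.toNat_natCast, not_lt.mpr (Int.natCast_nonneg m)]
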